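-- pv_equiv track=rewrite | github.com/CelestialCrafter/fenlu | scripts/filter-tags.py | has_tags
-- ===== SOURCE A (Python) =====
-- def has_tag(tags, desired):
--     return any(tag == desired for tag in tags)
--
-- def has_tags(tags, desired):
--     result = True
--
--     for tag in desired:
--         invert = False
--         if tag.startswith('!'):
--             invert = True
--             tag = tag[1:]
--
--         result = result and has_tag(tags, tag)
--         if invert:
--             result = not result
--         if not result:
--             return False
--
--     return True
-- ===== SOURCE B (Python) =====
-- def has_tags(tags, desired):
--     required = set()
--     forbidden = set()
--     for tag in desired:
--         if tag.startswith('!'):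
--             forbidden.add(tag[1:])
--         else:
--             required.add(tag)
--     have = set(tags)
--     return required <= have and forbidden.isdisjoint(have)
-- ===== Notes on version B (the rewrite author's own statement) =====
-- stated objective: simpler
-- what changed: Replaces the per-tag short-circuit loop (with its invert flag and carried result) by a one-pass classification of desired into required/forbidden sets followed by two set-algebra checks against set(tags).
import Mathlib
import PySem

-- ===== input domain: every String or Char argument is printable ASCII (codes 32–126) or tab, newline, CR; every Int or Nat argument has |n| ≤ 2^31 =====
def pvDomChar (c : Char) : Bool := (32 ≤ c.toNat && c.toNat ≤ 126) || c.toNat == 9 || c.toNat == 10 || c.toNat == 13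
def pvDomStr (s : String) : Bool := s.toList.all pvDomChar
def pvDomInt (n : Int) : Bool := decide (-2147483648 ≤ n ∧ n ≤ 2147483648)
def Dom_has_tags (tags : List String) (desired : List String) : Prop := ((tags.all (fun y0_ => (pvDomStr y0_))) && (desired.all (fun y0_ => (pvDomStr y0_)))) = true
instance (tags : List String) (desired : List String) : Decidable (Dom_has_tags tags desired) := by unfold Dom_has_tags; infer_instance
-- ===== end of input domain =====

-- B replaces A's per-tag short-circuit loop by classifying desired into required/forbidden sets
-- and two set-algebra checks against set(tags) (objective: simpler).


-- ===== PORT A =====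
def has_tag (tags : List String) (desired : String) : Bool :=
  tags.any (fun tag => tag == desired)

def has_tagsLoop (tags : List String) : List String → Bool → Bool
  | [], _result => true
  | tag :: rest, result =>
    let invert := PySem.Str.startswith tag "!"
    let tag := if invert then PySem.Str.slice tag (some 1) none else tag
    let result := result && has_tag tags tag
    let result := if invert then !result else result
    if result = false then false else has_tagsLoop tags rest result

def has_tags (tags : List String) (desired : List String) : Bool :=
  has_tagsLoop tags desired true

-- ===== PORT B =====
def has_tags_alt (tags : List String) (desired : List String) : Bool :=
  let rf : PySem.Set String × PySem.Set String :=
    desired.foldl (fun p tag =>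
      if PySem.Str.startswith tag "!" then
        (p.1, PySem.Set.add p.2 (PySem.Str.slice tag (some 1) none))
      else
        (PySem.Set.add p.1 tag, p.2)) (PySem.Set.empty, PySem.Set.empty)
  let have_ : PySem.Set String := PySem.Set.ofList tags
  PySem.Set.issubset rf.1 have_ && PySem.Set.isdisjoint rf.2 have_

-- ===== PRECONDITION & SPEC =====
def Spec_has_tags (tags : List String) (desired : List String) (out : Bool) : Prop := out = has_tags_alt tags desired
instance (tags : List String) (desired : List String) (out : Bool) : Decidable (Spec_has_tags tags desired out) := by unfold Spec_has_tags; infer_instance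

-- ===== CLAIM (what is proved, stated in full; the proofs are below) =====
def Claim_equal_has_tags : Prop := ∀ (tags : List String) (desired : List String), Dom_has_tags tags desired → Spec_has_tags tags desired (has_tags tags desired)

-- ===== LEMMAS AND PROOFS =====

-- the per-tag verdict both programs decide: a '!'-tag must be absent, any other tag present
def tagOk (tags : List String) (tag : String) : Bool :=
  if PySem.Str.startswith tag "!" then !(has_tag tags (PySem.Str.slice tag (some 1) none))
  else has_tag tags tag

theorem has_tagsLoop_eq_all (tags : List String) (desired : List String) :
    has_tagsLoop tags desired true = desired.all (tagOk tags) := by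
  induction desired with
  | nil => rfl
  | cons t rest ih =>
    show (let invert := PySem.Str.startswith t "!"
          let tag := if invert then PySem.Str.slice t (some 1) none else t
          let result := true && has_tag tags tag
          let result := if invert then !result else result
          if result = false then false else has_tagsLoop tags rest result)
        = (tagOk tags t && rest.all (tagOk tags))
    simp only [Bool.true_and, tagOk]
    by_cases h : PySem.Str.startswith t "!" = true
    · rw [if_pos h, if_pos h, if_pos h]
      cases hb : has_tag tags (PySem.Str.slice t (some 1) none) <;> simp [ih]
    · rw [if_neg h, if_neg h, if_neg h]
      cases hb : has_tag tags t <;> simp [ih]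

theorem foldl_split (desired : List String) (p : PySem.Set String × PySem.Set String) :
    desired.foldl (fun p tag =>
      if PySem.Str.startswith tag "!" then
        (p.1, PySem.Set.add p.2 (PySem.Str.slice tag (some 1) none))
      else
        (PySem.Set.add p.1 tag, p.2)) p =
    (PySem.Set.update p.1 (desired.filter (fun t => !(PySem.Str.startswith t "!"))),
     PySem.Set.update p.2 ((desired.filter (fun t => PySem.Str.startswith t "!")).map
        (fun t => PySem.Str.slice t (some 1) none))) := by
  induction desired generalizing p with
  | nil => simp [PySem.Set.update]
  | cons t rest ih =>
    rw [List.foldl_cons, ih, List.filter_cons, List.filter_cons]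
    by_cases h : PySem.Str.startswith t "!" = true
    · rw [if_pos h]
      simp only [h, Bool.not_true, if_pos, if_neg, Bool.false_eq_true, not_false_iff,
        List.map_cons, PySem.Set.update_cons]
    · rw [if_neg h]
      simp only [Bool.not_eq_true] at h
      simp only [h, Bool.not_false, ite_true, Bool.false_eq_true, ite_false,
        PySem.Set.update_cons]

theorem has_tag_iff_mem (tags : List String) (x : String) :
    has_tag tags x = true ↔ x ∈ tags := by
  simp [has_tag]

theorem has_tag_eq_false_iff (tags : List String) (x : String) :
    has_tag tags x = false ↔ x ∉ tags := by
  rw [← Bool.not_eq_true, has_tag_iff_mem]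

theorem has_tags_spec_core (tags : List String) (desired : List String) :
    has_tagsLoop tags desired true = has_tags_alt tags desired := by
  rw [Bool.eq_iff_iff, has_tagsLoop_eq_all]
  show _ ↔ (PySem.Set.issubset _ _ && PySem.Set.isdisjoint _ _) = true
  rw [foldl_split, Bool.and_eq_true, PySem.Set.issubset_iff, PySem.Set.isdisjoint_iff]
  simp only [PySem.Set.mem_update, PySem.Set.mem_ofList, List.not_mem_nil, false_or,
    List.mem_map, List.mem_filter, List.all_eq_true, PySem.Set.empty]
  constructor
  · intro h
    refine ⟨fun x hx => ?_, fun x hx => ?_⟩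
    · have hs : PySem.Str.startswith x "!" = false := by simpa using hx.2
      have := h x hx.1
      rw [tagOk, if_neg (by rw [hs]; simp)] at this
      exact (has_tag_iff_mem tags x).mp this
    · obtain ⟨u, ⟨hu, hb⟩, rfl⟩ := hx
      have := h u hu
      rw [tagOk, if_pos hb, Bool.not_eq_true'] at this
      exact (has_tag_eq_false_iff tags _).mp this
  · rintro ⟨hreq, hforb⟩ t ht
    rw [tagOk]
    by_cases hb : PySem.Str.startswith t "!" = true
    · rw [if_pos hb, Bool.not_eq_true']
      have := hforb (PySem.Str.slice t (some 1) none) ⟨t, ⟨ht, hb⟩, rfl⟩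
      exact (has_tag_eq_false_iff tags _).mpr this
    · rw [if_neg hb]
      exact (has_tag_iff_mem tags t).mpr (hreq t ⟨ht, by simp [Bool.not_eq_true] at hb ⊢; exact hb⟩)

-- ===== VERDICT (by name: the statement is the Claim_ definition above) =====
theorem has_tags_spec : Claim_equal_has_tags := by
  intro tags desired _
  exact has_tags_spec_core tags desired
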